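-- pv_equiv track=rewrite | github.com/mjjunng/repo | programmers/dragonappear/week5/PG_마법의 엘리베이터.py | solution_iterative
-- ===== SOURCE A (Python) =====
-- def solution_iterative(storey):
--     answer = 0 # 마법의 돌
--     while storey:
--         one,ten = storey % 10,(storey // 10) % 10 # 1의 자리,10의 자리
--         if one>5:
--             answer+=10-one
--             storey+=10
--         elif one==5:
--             answer+=5
--             storey+= 10 if ten>=5 else 0
--         else:
--             answer+=one
--         storey//=10
--     return answer
-- ===== SOURCE B (Python) =====
-- def solution_iterative(storey):
--     # Two-state digit DP over the decimal digits (LSB first):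
--     # c0 = min stones with no carry pending, c1 = min stones with a carry pending.
--     c0, c1 = 0, 10**9
--     n = storey
--     while n > 0:
--         d = n % 10
--         c0, c1 = min(c0 + d, c1 + d + 1), min(c0 + 10 - d, c1 + 9 - d)
--         n //= 10
--     return min(c0, c1 + 1)
-- ===== Notes on version B (the rewrite author's own statement) =====
-- stated objective: alternative
-- what changed: Replaces the greedy that mutates storey (re-adding 10 on carries and peeking at the next digit to break the d==5 tie) with a two-state dynamic program over the decimal digits that tracks the minimal cost with and without a pending carry.
-- outside the precondition, e.g. on solution_iterative(-1): A returns 1, B returns 0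
import Mathlib
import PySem

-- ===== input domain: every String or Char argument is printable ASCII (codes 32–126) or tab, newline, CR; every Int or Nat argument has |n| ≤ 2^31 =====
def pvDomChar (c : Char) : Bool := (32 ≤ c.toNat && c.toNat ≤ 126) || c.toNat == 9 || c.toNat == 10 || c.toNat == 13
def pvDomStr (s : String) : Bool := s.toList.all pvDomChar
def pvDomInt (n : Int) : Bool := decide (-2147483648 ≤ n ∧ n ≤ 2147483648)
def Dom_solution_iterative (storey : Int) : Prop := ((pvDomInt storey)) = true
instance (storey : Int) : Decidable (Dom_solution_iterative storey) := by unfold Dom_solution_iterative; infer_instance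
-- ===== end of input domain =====

-- B replaces A's greedy (which mutates storey, re-adding 10 on carries and peeking at the
-- next digit to break the d==5 tie) by a two-state carry DP over the decimal digits.

-- ===== PORT A =====
-- A's while-loop; fuel is only a totality guard (the loop runs at most ~11 times for |storey| ≤ 2^31)
def solution_iterative_loop : Nat → Int → Int → Int
  | 0, _, answer => answer
  | fuel+1, storey, answer =>
    if storey = 0 then answer
    else
      let one := PySem.Int.mod storey 10
      let ten := PySem.Int.mod (PySem.Int.floordiv storey 10) 10
      if 5 < one then
        solution_iterative_loop fuel (PySem.Int.floordiv (storey + 10) 10) (answer + (10 - one))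
      else if one = 5 then
        solution_iterative_loop fuel (PySem.Int.floordiv (storey + (if 5 ≤ ten then 10 else 0)) 10) (answer + 5)
      else
        solution_iterative_loop fuel (PySem.Int.floordiv storey 10) (answer + one)

def solution_iterative (storey : Int) : Int := solution_iterative_loop 64 storey 0

-- ===== PORT B =====
-- Source B's 'while n > 0' loop: n stays positive inside the loop, so the Nat operations % and /
-- coincide exactly with Python's % and // here; n ≤ 0 skips the loop, matching toNat = 0.
def solution_iterative_alt_loop : Nat → Int → Int → Int × Int
  | 0, c0, c1 => (c0, c1)
  | n+1, c0, c1 =>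
    let d : Int := (((n+1) % 10 : Nat) : Int)
    solution_iterative_alt_loop ((n+1)/10) (min (c0 + d) (c1 + d + 1)) (min (c0 + 10 - d) (c1 + 9 - d))
  termination_by n _ _ => n
  decreasing_by exact Nat.div_lt_self (Nat.succ_pos n) (by norm_num)

def solution_iterative_alt (storey : Int) : Int :=
  let p := solution_iterative_alt_loop storey.toNat 0 1000000000
  min p.1 (p.2 + 1)

-- ===== PRECONDITION & SPEC =====
-- A also returns values on negative storeys (an artefact of Python floor-division digit
-- arithmetic), but a negative storey is outside the problem's natural domain of building
-- floors, so Pre_ restricts to non-negative storeys, where B's loop body is never entered.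
def Pre_solution_iterative (storey : Int) : Prop := 0 ≤ storey
instance (storey : Int) : Decidable (Pre_solution_iterative storey) := by unfold Pre_solution_iterative; infer_instance
def pvWitness_solution_iterative : Int := (2554)

def Spec_solution_iterative (storey : Int) (out : Int) : Prop := out = solution_iterative_alt storey
instance (storey : Int) (out : Int) : Decidable (Spec_solution_iterative storey out) := by unfold Spec_solution_iterative; infer_instance

-- ===== CLAIM (what is proved, stated in full; the proofs are below) =====
def Claim_equal_solution_iterative : Prop := ∀ (storey : Int), Dom_solution_iterative storey → Pre_solution_iterative storey → Spec_solution_iterative storey (solution_iterative storey)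

-- ===== LEMMAS AND PROOFS =====

-- fmin n = the true minimum number of stones to clear n (the common value of both programs)
def fmin : Nat → Int
  | 0 => 0
  | 1 => 1
  | n+2 =>
    min ((((n+2) % 10 : Nat) : Int) + fmin ((n+2) / 10))
        ((10 : Int) - (((n+2) % 10 : Nat) : Int) + fmin ((n+2) / 10 + 1))
  decreasing_by
  · exact Nat.div_lt_self (by omega) (by norm_num)
  · omega

theorem fmin_eq (m : Nat) (h : 1 ≤ m) :
    fmin m = min (((m % 10 : Nat) : Int) + fmin (m / 10))
                 ((10 : Int) - ((m % 10 : Nat) : Int) + fmin (m / 10 + 1)) := by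
  match m with
  | 1 => norm_num [fmin]
  | (n+2) => rw [fmin]

theorem fmin_nonneg (m : Nat) : 0 ≤ fmin m := by
  induction m using Nat.strong_induction_on with
  | _ m ih =>
    match m with
    | 0 => simp [fmin]
    | 1 => simp [fmin]
    | (n+2) =>
      rw [fmin]
      have h1 := ih ((n+2)/10) (Nat.div_lt_self (by omega) (by norm_num))
      have h2 := ih ((n+2)/10 + 1) (by omega)
      have hd : (0:Int) ≤ (((n+2) % 10 : Nat) : Int) := by positivity
      have hd' : (((n+2) % 10 : Nat) : Int) ≤ 9 := by
        have := Nat.mod_lt (n+2) (y := 10) (by norm_num); exact_mod_cast Nat.le_of_lt_succ this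
      omega

-- the two ±1 Lipschitz bounds on fmin
theorem fmin_step (m : Nat) : fmin (m+1) ≤ fmin m + 1 ∧ fmin m ≤ fmin (m+1) + 1 := by
  induction m using Nat.strong_induction_on with
  | _ m ih =>
    match m with
    | 0 => simp [fmin]
    | (n+1) =>
      have hm : 1 ≤ n+1 := by omega
      have e1 := fmin_eq (n+1) hm
      have e2 := fmin_eq (n+2) (by omega)
      by_cases h9 : (n+1) % 10 = 9
      · -- carry case: (n+2) % 10 = 0, (n+2)/10 = (n+1)/10 + 1
        have hq : (n+2) % 10 = 0 := by omega
        have hqd : (n+2) / 10 = (n+1) / 10 + 1 := by omega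
        rw [hq, hqd] at e2
        rw [h9] at e1
        have hlt : (n+1)/10 < n+1 := Nat.div_lt_self (by omega) (by norm_num)
        have i1 := ih ((n+1)/10) hlt
        have i2 := ih ((n+1)/10 + 1) (by omega)
        simp only [show n+1+1 = n+2 from rfl, min_def] at *
        split_ifs at * <;> omega
      · have hq : (n+2) % 10 = (n+1) % 10 + 1 := by omega
        have hqd : (n+2) / 10 = (n+1) / 10 := by omega
        rw [hq, hqd] at e2
        simp only [show n+1+1 = n+2 from rfl, min_def] at *
        split_ifs at * <;> omega

-- tie direction used by A's d = 5 branch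
theorem fmin_tie (m : Nat) :
    (5 ≤ m % 10 → fmin (m+1) ≤ fmin m) ∧ (m % 10 < 5 → fmin m ≤ fmin (m+1)) := by
  match m with
  | 0 => exact ⟨by omega, fun _ => by simp [fmin]⟩
  | (n+1) =>
    have hm : 1 ≤ n+1 := by omega
    have e1 := fmin_eq (n+1) hm
    have e2 := fmin_eq (n+2) (by omega)
    have s1 := fmin_step ((n+1)/10)
    have s2 := fmin_step ((n+1)/10 + 1)
    constructor
    · intro h5
      by_cases h9 : (n+1) % 10 = 9
      · have hq : (n+2) % 10 = 0 := by omega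
        have hqd : (n+2) / 10 = (n+1) / 10 + 1 := by omega
        rw [hq, hqd] at e2; rw [h9] at e1
        simp only [show n+1+1 = n+2 from rfl, min_def] at *
        split_ifs at * <;> omega
      · have hq : (n+2) % 10 = (n+1) % 10 + 1 := by omega
        have hqd : (n+2) / 10 = (n+1) / 10 := by omega
        rw [hq, hqd] at e2
        simp only [show n+1+1 = n+2 from rfl, min_def] at *
        split_ifs at * <;> omega
    · intro h5
      have hq : (n+2) % 10 = (n+1) % 10 + 1 := by omega
      have hqd : (n+2) / 10 = (n+1) / 10 := by omega
      rw [hq, hqd] at e2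
      simp only [show n+1+1 = n+2 from rfl, min_def] at *
      split_ifs at * <;> omega

-- B's forward DP computes fmin: invariant over the loop
theorem alt_loop_invariant (n : Nat) : ∀ c0 c1 : Int,
    min (solution_iterative_alt_loop n c0 c1).1 ((solution_iterative_alt_loop n c0 c1).2 + 1)
      = min (c0 + fmin n) (c1 + fmin (n+1)) := by
  induction n using Nat.strong_induction_on with
  | _ n ih =>
    intro c0 c1
    match n with
    | 0 => simp [solution_iterative_alt_loop, fmin]
    | (m+1) =>
      rw [solution_iterative_alt_loop]
      have hlt : (m+1)/10 < m+1 := Nat.div_lt_self (by omega) (by norm_num)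
      rw [ih ((m+1)/10) hlt]
      have e1 := fmin_eq (m+1) (by omega)
      have e2 := fmin_eq (m+2) (by omega)
      by_cases h9 : (m+1) % 10 = 9
      · have hq : (m+2) % 10 = 0 := by omega
        have hqd : (m+2) / 10 = (m+1) / 10 + 1 := by omega
        rw [hq, hqd] at e2; rw [h9] at e1
        have hd10 : (m+1)/10 + 1 + 1 = (m+1)/10 + 2 := by omega
        have s1 := fmin_step ((m+1)/10)
        have s2 := fmin_step ((m+1)/10 + 1)
        rw [h9]
        simp only [show m+1+1 = m+2 from rfl, min_def] at *
        split_ifs at * <;> omega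
      · have hq : (m+2) % 10 = (m+1) % 10 + 1 := by omega
        have hqd : (m+2) / 10 = (m+1) / 10 := by omega
        rw [hq, hqd] at e2
        simp only [show m+1+1 = m+2 from rfl, min_def] at *
        split_ifs at * <;> omega

theorem alt_eq_fmin (storey : Int) :
    solution_iterative_alt storey = fmin storey.toNat := by
  show min (solution_iterative_alt_loop storey.toNat 0 1000000000).1
        ((solution_iterative_alt_loop storey.toNat 0 1000000000).2 + 1) = _
  rw [alt_loop_invariant]
  have s := fmin_step storey.toNat
  have n1 := fmin_nonneg storey.toNat
  have n2 := fmin_nonneg (storey.toNat + 1)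
  simp only [min_def]
  split_ifs <;> omega

-- A's greedy computes fmin, given enough fuel for the digit count
theorem a_loop_eq (k : Nat) : ∀ (s a : Int), 0 ≤ s → s ≤ 10 ^ k →
    solution_iterative_loop (k+1) s a = a + fmin s.toNat := by
  induction k with
  | zero =>
    intro s a h0 h1
    interval_cases s
    · simp [solution_iterative_loop, fmin]
    · have h1' : PySem.Int.mod 1 10 = 1 := by decide
      have h2' : PySem.Int.floordiv 1 10 = 0 := by decide
      rw [solution_iterative_loop]
      norm_num [h1', h2', solution_iterative_loop, fmin]
  | succ k ih =>
    intro s a h0 h1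
    by_cases hz : s = 0
    · subst hz; simp [solution_iterative_loop, fmin]
    · obtain ⟨n, rfl⟩ : ∃ n : Nat, s = (n : Int) := ⟨s.toNat, (Int.toNat_of_nonneg h0).symm⟩
      have hn : 1 ≤ n := by omega
      have hP : (n : Int) ≤ 10 ^ (k+1) := h1
      have hPn : n ≤ 10 ^ (k+1) := by exact_mod_cast hP
      have hpow : (10:Nat) ^ (k+1) = 10 * 10 ^ k := by ring
      rw [solution_iterative_loop]
      simp only [if_neg hz]
      have hmod : PySem.Int.mod (n : Int) 10 = ((n % 10 : Nat) : Int) :=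
        PySem.Int.mod_natCast n 10
      have hdiv : PySem.Int.floordiv (n : Int) 10 = ((n / 10 : Nat) : Int) :=
        PySem.Int.floordiv_natCast n 10
      have hdiv10 : PySem.Int.floordiv ((n : Int) + 10) 10 = ((n / 10 + 1 : Nat) : Int) := by
        have h' : ((n : Int) + 10) = ((n + 10 : Nat) : Int) := by push_cast; ring
        have h2 := PySem.Int.floordiv_natCast (n+10) 10
        rw [show (n+10)/10 = n/10 + 1 from by omega] at h2
        rw [h']; exact_mod_cast h2
      have hten : PySem.Int.mod (PySem.Int.floordiv (n : Int) 10) 10 = ((n / 10 % 10 : Nat) : Int) := by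
        rw [hdiv]; exact PySem.Int.mod_natCast _ 10
      have e := fmin_eq n hn
      have s1 := fmin_step (n / 10)
      have tie := fmin_tie (n / 10)
      rw [hmod, hten, hdiv, hdiv10]
      by_cases h5 : 5 < ((n % 10 : Nat) : Int)
      · rw [if_pos h5]
        have h5' : 5 < n % 10 := by exact_mod_cast h5
        have hb : (((n / 10 + 1 : Nat)) : Int) ≤ 10 ^ k := by
          have : n / 10 + 1 ≤ 10 ^ k := by omega
          exact_mod_cast this
        rw [ih _ _ (by positivity) hb]
        simp only [Int.toNat_natCast]
        have hmm : n % 10 < 10 := Nat.mod_lt _ (by norm_num)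
        simp only [min_def] at e
        split_ifs at e <;> omega
      · rw [if_neg h5]
        by_cases heq : ((n % 10 : Nat) : Int) = 5
        · rw [if_pos heq]
          have heq' : n % 10 = 5 := by exact_mod_cast heq
          by_cases hten5 : 5 ≤ ((n / 10 % 10 : Nat) : Int)
          · rw [if_pos hten5]
            have hten5' : 5 ≤ n / 10 % 10 := by exact_mod_cast hten5
            have hb : (((n / 10 + 1 : Nat)) : Int) ≤ 10 ^ k := by
              have : n / 10 + 1 ≤ 10 ^ k := by omega
              exact_mod_cast this
            rw [show (n : Int) + 10 = ((n : Int) + 10) from rfl, hdiv10, ih _ _ (by positivity) hb]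
            simp only [Int.toNat_natCast]
            have ht := tie.1 hten5'
            simp only [min_def] at e
            split_ifs at e <;> omega
          · rw [if_neg hten5]
            have hten5' : n / 10 % 10 < 5 := by
              by_contra hc; exact hten5 (by exact_mod_cast Nat.le_of_not_lt (fun h => hc (by omega)))
            have hb : (((n / 10 : Nat)) : Int) ≤ 10 ^ k := by
              have : n / 10 ≤ 10 ^ k := by omega
              exact_mod_cast this
            have : (n : Int) + 0 = (n : Int) := by ring
            rw [this, hdiv, ih _ _ (by positivity) hb]
            simp only [Int.toNat_natCast]
            have ht := tie.2 hten5'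
            simp only [min_def] at e
            split_ifs at e <;> omega
        · rw [if_neg heq]
          have hlt5 : n % 10 < 5 := by
            have h1' : ¬ 5 < n % 10 := fun h => h5 (by exact_mod_cast h)
            have h2' : n % 10 ≠ 5 := fun h => heq (by exact_mod_cast h)
            omega
          have hb : (((n / 10 : Nat)) : Int) ≤ 10 ^ k := by
            have : n / 10 ≤ 10 ^ k := by omega
            exact_mod_cast this
          rw [ih _ _ (by positivity) hb]
          simp only [Int.toNat_natCast]
          simp only [min_def] at e
          split_ifs at e <;> omega

-- ===== VERDICT (by name: the statement is the Claim_ definition above) =====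
theorem solution_iterative_spec : Claim_equal_solution_iterative := by
  intro storey hdom hpre
  unfold Spec_solution_iterative
  have hb : storey ≤ 10 ^ 63 := by
    have : storey ≤ 2147483648 := by
      unfold Dom_solution_iterative pvDomInt at hdom
      simpa using (of_decide_eq_true hdom).2
    calc storey ≤ 2147483648 := this
      _ ≤ 10 ^ 63 := by norm_num
  have := a_loop_eq 63 storey 0 hpre hb
  unfold solution_iterative
  rw [this, alt_eq_fmin storey]
  ring
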